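-- pv_equiv track=rewrite | github.com/pypi-data/pypi-mirror-398 | packages/vcf-pg-loader/vcf_pg_loader-0.5.4.tar.gz/vcf_pg_loader-0.5.4/tests/vendored/echtvar/generate_test_vcf.py | generate_no_chr_prefix_vcf
-- ===== SOURCE A (Python) =====
-- def generate_no_chr_prefix_vcf(vcf_content: str) -> str:
--     """Generate VCF content without 'chr' prefix (1 instead of chr1)."""
--     lines = vcf_content.split("\n")
--     result = []
--     for line in lines:
--         if line.startswith("chr"):
--             result.append(line[3:])
--         else:
--             result.append(line)
--     return "\n".join(result)
-- ===== SOURCE B (Python) =====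
-- def generate_no_chr_prefix_vcf(vcf_content: str) -> str:
--     """Generate VCF content without 'chr' prefix (1 instead of chr1)."""
--     out = []
--     i = 0
--     at_line_start = True
--     n = len(vcf_content)
--     while i < n:
--         if at_line_start and vcf_content.startswith("chr", i):
--             i += 3
--             at_line_start = False
--         else:
--             c = vcf_content[i]
--             out.append(c)
--             at_line_start = c == "\n"
--             i += 1
--     return "".join(out)
-- ===== Notes on version B (the rewrite author's own statement) =====
-- stated objective: alternative
-- what changed: Replaced the split-on-newline / per-line rebuild / join pipeline with a single character-level scan that tracks a line-start flag and skips 'chr' exactly when it appears at a line start, never materialising the list of lines.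
import Mathlib
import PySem

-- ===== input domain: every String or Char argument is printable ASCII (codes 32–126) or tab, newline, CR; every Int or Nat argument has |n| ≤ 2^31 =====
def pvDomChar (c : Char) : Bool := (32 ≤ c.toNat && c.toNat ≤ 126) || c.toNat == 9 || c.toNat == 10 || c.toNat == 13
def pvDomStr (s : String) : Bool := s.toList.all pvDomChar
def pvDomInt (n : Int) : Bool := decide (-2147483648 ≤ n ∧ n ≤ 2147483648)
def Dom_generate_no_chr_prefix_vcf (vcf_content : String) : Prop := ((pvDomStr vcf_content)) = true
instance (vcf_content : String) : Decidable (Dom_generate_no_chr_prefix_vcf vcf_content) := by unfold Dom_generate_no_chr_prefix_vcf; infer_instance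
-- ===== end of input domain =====

-- B replaces A's split-on-newline / per-line-rebuild / join pipeline with a single character
-- scan that tracks a line-start flag and skips a line-initial "chr"; same cost, different structure.

-- ===== PORT A =====
def generate_no_chr_prefix_vcf (vcf_content : String) : String :=
  let lines : List String := (PySem.Chars.splitOn vcf_content.toList ['\n']).map String.ofList
  let result : List String := lines.foldl (fun acc line =>
    if PySem.Str.startswith line "chr" then acc ++ [PySem.Str.slice line (some 3) none]
    else acc ++ [line]) []
  PySem.Str.join "\n" result

-- ===== PORT B =====
-- B's while loop over an index with an at_line_start flag, as recursion over the remaining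
-- characters (same state, same branches: skip 3 on a line-start "chr", else copy one char).
def pvAltGo (atStart : Bool) (cs : List Char) : List Char :=
  match cs with
  | [] => []
  | c :: rest =>
    if atStart && ['c','h','r'].isPrefixOf (c :: rest) then pvAltGo false ((c :: rest).drop 3)
    else c :: pvAltGo (c == '\n') rest
termination_by cs.length
decreasing_by
  all_goals simp

def generate_no_chr_prefix_vcf_alt (vcf_content : String) : String :=
  String.ofList (pvAltGo true vcf_content.toList)

-- ===== PRECONDITION & SPEC =====
def Spec_generate_no_chr_prefix_vcf (vcf_content : String) (out : String) : Prop := out = generate_no_chr_prefix_vcf_alt vcf_content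
instance (vcf_content : String) (out : String) : Decidable (Spec_generate_no_chr_prefix_vcf vcf_content out) := by unfold Spec_generate_no_chr_prefix_vcf; infer_instance

-- ===== CLAIM (what is proved, stated in full; the proofs are below) =====
def Claim_equal_generate_no_chr_prefix_vcf : Prop := ∀ (vcf_content : String), Dom_generate_no_chr_prefix_vcf vcf_content → Spec_generate_no_chr_prefix_vcf vcf_content (generate_no_chr_prefix_vcf vcf_content)

-- ===== LEMMAS AND PROOFS =====

theorem pvAltGo_nil (b : Bool) : pvAltGo b [] = [] := by rw [pvAltGo.eq_def]

theorem pvAltGo_cons (b : Bool) (c : Char) (cs : List Char) :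
    pvAltGo b (c :: cs) =
      if b && ['c','h','r'].isPrefixOf (c :: cs) then pvAltGo false ((c :: cs).drop 3)
      else c :: pvAltGo (c == '\n') cs := by rw [pvAltGo.eq_def]

-- the per-line transformation A applies, at the character-list level
def pvF (l : List Char) : List Char :=
  if ['c','h','r'].isPrefixOf l then l.drop 3 else l

-- reference recursion for splitting on '\n' with an accumulated current line
def pvLinesAux : List Char → List Char → List (List Char)
  | pre, [] => [pre]
  | pre, c :: rest => if c = '\n' then pre :: pvLinesAux [] rest else pvLinesAux (pre ++ [c]) rest

theorem pv_go_spec (fuel : Nat) (l cur : List Char) (acc : List (List Char))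
    (h : l.length < fuel) :
    PySem.Chars.splitOn.go ['\n'] fuel l cur acc = acc.reverse ++ pvLinesAux cur.reverse l := by
  induction fuel generalizing l cur acc with
  | zero => omega
  | succ fuel ih =>
    cases l with
    | nil => rw [PySem.Chars.splitOn.go.eq_def]; simp [pvLinesAux]
    | cons c rest =>
      have step : PySem.Chars.splitOn.go ['\n'] (fuel + 1) (c :: rest) cur acc =
          if ['\n'].isPrefixOf (c :: rest) = true then
            PySem.Chars.splitOn.go ['\n'] fuel (List.drop ['\n'].length (c :: rest)) [] (cur.reverse :: acc)
          else PySem.Chars.splitOn.go ['\n'] fuel rest (c :: cur) acc := by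
        rw [PySem.Chars.splitOn.go.eq_def]
      rw [step]
      simp only [List.length_cons] at h
      by_cases hc : c = '\n'
      · subst hc
        rw [if_pos (by simp [List.isPrefixOf])]
        rw [ih _ _ _ (by simp; omega)]
        simp [pvLinesAux]
      · rw [if_neg (by simp [List.isPrefixOf, Ne.symm hc])]
        rw [ih _ _ _ (by omega)]
        simp [pvLinesAux, hc]

theorem pv_splitOn_eq (cs : List Char) :
    PySem.Chars.splitOn cs ['\n'] = pvLinesAux [] cs := by
  have := pv_go_spec (cs.length + 1) cs [] [] (by omega)
  simpa [PySem.Chars.splitOn] using this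

theorem pv_linesAux_no_nl (line : List Char) (pre : List Char) (h : '\n' ∉ line) :
    pvLinesAux pre line = [pre ++ line] := by
  induction line generalizing pre with
  | nil => simp [pvLinesAux]
  | cons c cs ih =>
    have hc : ¬ c = '\n' := fun hh => h (by simp [hh])
    rw [pvLinesAux, if_neg hc, ih _ (fun hm => h (by simp [hm]))]
    simp

theorem pv_linesAux_split (line rest : List Char) (pre : List Char) (h : '\n' ∉ line) :
    pvLinesAux pre (line ++ '\n' :: rest) = (pre ++ line) :: pvLinesAux [] rest := by
  induction line generalizing pre with
  | nil => simp [pvLinesAux]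
  | cons c cs ih =>
    have hc : ¬ c = '\n' := fun hh => h (by simp [hh])
    rw [List.cons_append, pvLinesAux, if_neg hc, ih _ (fun hm => h (by simp [hm]))]
    simp

theorem pv_linesAux_ne_nil (pre l : List Char) : pvLinesAux pre l ≠ [] := by
  induction l generalizing pre with
  | nil => simp [pvLinesAux]
  | cons c cs ih => rw [pvLinesAux]; split <;> simp [ih]

-- pvAltGo in mid-line state copies a newline-free block unchanged
theorem pv_altGo_false (line rest : List Char) (h : '\n' ∉ line) :
    pvAltGo false (line ++ rest) = line ++ pvAltGo false rest := by
  induction line with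
  | nil => simp
  | cons c cs ih =>
    have hc : (c == '\n') = false := by
      simp only [beq_eq_false_iff_ne, ne_eq]; exact fun hh => h (by simp [hh])
    rw [List.cons_append, pvAltGo]
    simp only [Bool.false_and, Bool.false_eq_true, if_false, hc]
    rw [ih (fun hm => h (by simp [hm]))]
    simp

theorem pv_chr_prefix_line (line rest : List Char) (h : '\n' ∉ line) :
    ['c','h','r'].isPrefixOf (line ++ '\n' :: rest) = ['c','h','r'].isPrefixOf line := by
  match line, h with
  | [], _ => simp [List.isPrefixOf]
  | [a], _ => simp [List.isPrefixOf]
  | [a, b], _ => simp [List.isPrefixOf]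
  | a :: b :: c :: t, _ => simp [List.isPrefixOf]

theorem pv_altGo_line_end (line : List Char) (h : '\n' ∉ line) :
    pvAltGo true line = pvF line := by
  unfold pvF
  by_cases hp : ['c','h','r'].isPrefixOf line = true
  · obtain ⟨t, ht⟩ := (List.isPrefixOf_iff_prefix.mp hp)
    subst ht
    have h1 : pvAltGo true ('c'::'h'::'r'::t) = pvAltGo false t := by
      rw [pvAltGo_cons]; simp [List.isPrefixOf]
    have h2 := pv_altGo_false t [] (fun hm => h (by simp [hm]))
    simp only [List.append_nil] at h2
    simp only [List.cons_append, List.nil_append] at hp ⊢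
    rw [h1, h2, if_pos hp]
    simp [pvAltGo_nil]
  · cases line with
    | nil => simp [pvAltGo_nil, hp]
    | cons c cs =>
      have hc : (c == '\n') = false := by
        simp only [beq_eq_false_iff_ne, ne_eq]; exact fun hh => h (by simp [hh])
      have h1 : pvAltGo true (c :: cs) = c :: pvAltGo false cs := by
        rw [pvAltGo_cons]; simp [hp, hc]
      have h2 := pv_altGo_false cs [] (fun hm => h (by simp [hm]))
      simp only [List.append_nil] at h2
      rw [h1, h2, if_neg hp]
      simp [pvAltGo_nil]

theorem pv_altGo_line (line rest : List Char) (h : '\n' ∉ line) :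
    pvAltGo true (line ++ '\n' :: rest) = pvF line ++ '\n' :: pvAltGo true rest := by
  have hnl : pvAltGo false ('\n' :: rest) = '\n' :: pvAltGo true rest := by
    rw [pvAltGo_cons]; simp
  unfold pvF
  by_cases hp : ['c','h','r'].isPrefixOf line = true
  · obtain ⟨t, ht⟩ := (List.isPrefixOf_iff_prefix.mp hp)
    subst ht
    have h1 : pvAltGo true ('c'::'h'::'r'::(t ++ '\n' :: rest)) = pvAltGo false (t ++ '\n' :: rest) := by
      rw [pvAltGo_cons]; simp [List.isPrefixOf]
    have h2 := pv_altGo_false t ('\n' :: rest) (fun hm => h (by simp [hm]))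
    simp only [List.cons_append, List.nil_append] at hp ⊢
    rw [h1, h2, hnl, if_pos hp]
    simp
  · have hptot : ['c','h','r'].isPrefixOf (line ++ '\n' :: rest) = false := by
      rw [pv_chr_prefix_line _ _ h]; exact Bool.not_eq_true _ ▸ hp
    cases line with
    | nil =>
      rw [List.nil_append, if_neg hp, List.nil_append, pvAltGo_cons]
      simp [List.isPrefixOf]
    | cons c cs =>
      have hc : (c == '\n') = false := by
        simp only [beq_eq_false_iff_ne, ne_eq]; exact fun hh => h (by simp [hh])
      have h1 : pvAltGo true (c :: (cs ++ '\n' :: rest)) = c :: pvAltGo false (cs ++ '\n' :: rest) := by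
        rw [pvAltGo]
        simp only [List.cons_append] at hptot
        simp [hptot, hc]
      rw [List.cons_append, h1, pv_altGo_false cs ('\n' :: rest) (fun hm => h (by simp [hm])), hnl]
      rw [if_neg hp]
      simp

theorem pv_split_first (cs : List Char) (h : '\n' ∈ cs) :
    ∃ line rest, cs = line ++ '\n' :: rest ∧ '\n' ∉ line := by
  induction cs with
  | nil => simp at h
  | cons c t ih =>
    by_cases hc : c = '\n'
    · exact ⟨[], t, by simp [hc], by simp⟩
    · have ht : '\n' ∈ t := by
        rcases List.mem_cons.mp h with h1 | h1
        · exact absurd h1.symm hc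
        · exact h1
      obtain ⟨line, rest, hEq, hNo⟩ := ih ht
      refine ⟨c :: line, rest, by simp [hEq], ?_⟩
      intro hm
      rcases List.mem_cons.mp hm with h1 | h1
      · exact hc h1.symm
      · exact hNo h1

theorem pv_main_n (n : Nat) : ∀ cs : List Char, cs.length ≤ n →
    PySem.Chars.join ['\n'] ((pvLinesAux [] cs).map pvF) = pvAltGo true cs := by
  induction n with
  | zero =>
    intro cs hlen
    have : cs = [] := List.eq_nil_of_length_eq_zero (by omega)
    subst this
    simp [pvLinesAux, pvF, pvAltGo_nil, PySem.Chars.join_singleton]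
  | succ n ih =>
    intro cs hlen
    by_cases hmem : '\n' ∈ cs
    · obtain ⟨line, rest, hEq, hNo⟩ := pv_split_first cs hmem
      subst hEq
      rw [pv_linesAux_split line rest [] hNo, pv_altGo_line line rest hNo]
      simp only [List.nil_append, List.map_cons]
      obtain ⟨y, t, hyt⟩ : ∃ y t, pvLinesAux [] rest = y :: t := by
        cases hr : pvLinesAux [] rest with
        | nil => exact absurd hr (pv_linesAux_ne_nil [] rest)
        | cons y t => exact ⟨y, t, rfl⟩
      have hrest : rest.length ≤ n := by
        simp [List.length_append] at hlen; omega
      have := ih rest hrest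
      rw [hyt] at this ⊢
      rw [List.map_cons, PySem.Chars.join_cons_cons, ← List.map_cons, this]
      simp
    · rw [pv_linesAux_no_nl cs [] hmem, pv_altGo_line_end cs hmem]
      simp [PySem.Chars.join_singleton]

theorem pv_A_fold (L : List (List Char)) :
    (PySem.Str.join "\n" ((L.map String.ofList).foldl (fun acc line =>
        if PySem.Str.startswith line "chr" then acc ++ [PySem.Str.slice line (some 3)]
        else acc ++ [line]) [])).toList =
      PySem.Chars.join ['\n'] (L.map pvF) := by
  have hfun : (fun (acc : List String) line =>
      if PySem.Str.startswith line "chr" then acc ++ [PySem.Str.slice line (some 3)]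
      else acc ++ [line]) =
      (fun acc line => acc ++ [if PySem.Str.startswith line "chr" then PySem.Str.slice line (some 3) else line]) := by
    funext acc line; split <;> rfl
  rw [hfun, PySem.List.foldl_append_singleton_eq_map]
  rw [PySem.Str.toList_join]
  have hmap : ∀ l : List Char,
      (if PySem.Str.startswith (String.ofList l) "chr" then PySem.Str.slice (String.ofList l) (some 3)
       else String.ofList l).toList = pvF l := by
    intro l
    unfold pvF
    rw [PySem.Str.startswith_eq]
    simp only [String.toList_ofList]
    have hsw : PySem.Chars.startswith l "chr".toList = ['c','h','r'].isPrefixOf l := rfl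
    rw [hsw]
    split
    · rw [PySem.Str.toList_slice]
      simp only [PySem.Chars.slice_eq_listSlice, String.toList_ofList]
      rw [PySem.List.slice_from l (by norm_num : (0:Int) ≤ 3)]
      simp
    · simp
  simp only [List.nil_append, List.map_map, List.map_map]
  congr 1
  exact List.map_congr_left (fun l _ => hmap l)

theorem pv_A_chars (s : String) :
    (generate_no_chr_prefix_vcf s).toList =
      PySem.Chars.join ['\n'] ((PySem.Chars.splitOn s.toList ['\n']).map pvF) := by
  unfold generate_no_chr_prefix_vcf
  exact pv_A_fold (PySem.Chars.splitOn s.toList ['\n'])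

-- ===== VERDICT (by name: the statement is the Claim_ definition above) =====
theorem generate_no_chr_prefix_vcf_spec : Claim_equal_generate_no_chr_prefix_vcf := by
  intro s _
  unfold Spec_generate_no_chr_prefix_vcf generate_no_chr_prefix_vcf_alt
  have h := pv_A_chars s
  rw [pv_splitOn_eq, pv_main_n (s.toList.length) s.toList (le_refl _)] at h
  calc generate_no_chr_prefix_vcf s
      = String.ofList (generate_no_chr_prefix_vcf s).toList := by simp
    _ = String.ofList (pvAltGo true s.toList) := by rw [h]
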